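-- pv_equiv track=rewrite | github.com/Athithya-Sakthivel/Hybrid-RAGOps-AWS | indexing_pipeline/parse_chunk/formats/txt.py | _charpos_to_line_range
-- ===== SOURCE A (Python) =====
-- from typing import List,Dict,Any,Tuple,Optional,Generator
--
-- def _charpos_to_line_range(start_char:Optional[int],end_char:Optional[int],lines:List[str])->Tuple[int,int]:
--     if start_char is None or end_char is None or not lines:
--         return 1,max(1,len(lines))
--     cum=[0]
--     for ln in lines:
--         cum.append(cum[-1]+len(ln))
--     start_line=1
--     end_line=len(lines)
--     for i in range(len(cum)-1):
--         if cum[i]<=start_char<cum[i+1]: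
--             start_line=i+1
--             break
--     for j in range(len(cum)-1,-1,-1):
--         if j==0:
--             end_line=1
--             break
--         if cum[j-1]<=max(0,end_char-1)<cum[j]:
--             end_line=j
--             break
--     return start_line,end_line
-- ===== SOURCE B (Python) =====
-- def _charpos_to_line_range(start_char, end_char, lines):
--     if start_char is None or end_char is None or not lines:
--         return 1, max(1, len(lines))
--     target = max(0, end_char - 1)
--     start_line = 1
--     end_line = 1
--     start_set = False
--     end_set = False
--     off = 0
--     for idx, ln in enumerate(lines):
--         hi = off + len(ln)
--         if not start_set and off <= start_char < hi:
--             start_line = idx + 1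
--             start_set = True
--         if not end_set and off <= target < hi:
--             end_line = idx + 1
--             end_set = True
--         off = hi
--     return start_line, end_line
-- ===== Notes on version B (the rewrite author's own statement) =====
-- stated objective: simpler
-- what changed: Replaced the prefix-sum array plus a forward scan and a separate backward scan with a single forward pass over the lines carrying a running offset and two found-flags (no cum list is built), preserving the fallback of 1 when a position lies outside the document.
import Mathlib
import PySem

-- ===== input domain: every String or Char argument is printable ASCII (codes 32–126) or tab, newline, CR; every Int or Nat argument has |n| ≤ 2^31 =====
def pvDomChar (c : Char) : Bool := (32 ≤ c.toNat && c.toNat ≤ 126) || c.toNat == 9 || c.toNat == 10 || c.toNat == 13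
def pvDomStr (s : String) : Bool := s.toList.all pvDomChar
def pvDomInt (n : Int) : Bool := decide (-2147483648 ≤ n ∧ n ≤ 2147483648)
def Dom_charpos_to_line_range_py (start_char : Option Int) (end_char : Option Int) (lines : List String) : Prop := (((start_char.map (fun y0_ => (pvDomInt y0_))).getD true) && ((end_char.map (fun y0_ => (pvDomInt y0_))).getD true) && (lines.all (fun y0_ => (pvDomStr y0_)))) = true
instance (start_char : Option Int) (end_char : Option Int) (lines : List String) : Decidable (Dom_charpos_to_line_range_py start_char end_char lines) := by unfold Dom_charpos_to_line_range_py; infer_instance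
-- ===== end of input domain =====

-- B replaces A's prefix-sum array + forward scan + backward scan with one forward pass
-- carrying a running offset and two found-flags (objective: simpler). A is total; full equivalence.

-- ===== PORT A =====
-- cum list: cum=[0]; for ln in lines: cum.append(cum[-1]+len(ln))
def pvBuildCum : List String → List Int → List Int
  | [], cum => cum
  | ln :: rest, cum => pvBuildCum rest (cum ++ [cum.getLast! + PySem.Str.len ln])

-- forward loop: for i in range(len(cum)-1): if cum[i]<=start_char<cum[i+1]: start_line=i+1; break
-- (indices are always in range, so cum[i]/cum[i+1] appear as adjacent list elements)
def pvScanFwd (t : Int) : List Int → Nat → Int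
  | c0 :: c1 :: rest, i => if c0 ≤ t ∧ t < c1 then (i : Int) + 1 else pvScanFwd t (c1 :: rest) (i + 1)
  | _, _ => 1

-- backward loop: for j in range(len(cum)-1,-1,-1): if j==0: 1; if cum[j-1]<=m<cum[j]: j
-- (Lean counter j+1 is Python's j; indices always in range, read with getD)
def pvScanBwd (m : Int) (cum : List Int) : Nat → Int
  | 0 => 1
  | j + 1 => if cum.getD j 0 ≤ m ∧ m < cum.getD (j + 1) 0 then (j : Int) + 1 else pvScanBwd m cum j

def charpos_to_line_range_py (start_char : Option Int) (end_char : Option Int) (lines : List String) : Int × Int :=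
  if start_char.isNone || end_char.isNone || lines.isEmpty then (1, max 1 (lines.length : Int))
  else
    let s := start_char.getD 0
    let e := end_char.getD 0
    let cum := pvBuildCum lines [0]
    (pvScanFwd s cum 0, pvScanBwd (max 0 (e - 1)) cum (cum.length - 1))

-- ===== PORT B =====
-- single forward pass: state (idx, off, start_line, start_set, end_line, end_set)
def pvBLoop (s m : Int) : List String → Nat → Int → Int → Bool → Int → Bool → Int × Int
  | [], _, _, sl, _, el, _ => (sl, el)
  | ln :: rest, idx, off, sl, sset, el, eset =>
    let hi := off + PySem.Str.len ln
    let ps := !sset && decide (off ≤ s ∧ s < hi)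
    let pe := !eset && decide (off ≤ m ∧ m < hi)
    pvBLoop s m rest (idx + 1) hi
      (if ps then (idx : Int) + 1 else sl) (sset || ps)
      (if pe then (idx : Int) + 1 else el) (eset || pe)

def charpos_to_line_range_py_alt (start_char : Option Int) (end_char : Option Int) (lines : List String) : Int × Int :=
  if start_char.isNone || end_char.isNone || lines.isEmpty then (1, max 1 (lines.length : Int))
  else pvBLoop (start_char.getD 0) (max 0 (end_char.getD 0 - 1)) lines 0 0 1 false 1 false

-- ===== PRECONDITION & SPEC =====
def Spec_charpos_to_line_range_py (start_char : Option Int) (end_char : Option Int) (lines : List String) (out : Int × Int) : Prop := out = charpos_to_line_range_py_alt start_char end_char lines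
instance (start_char : Option Int) (end_char : Option Int) (lines : List String) (out : Int × Int) : Decidable (Spec_charpos_to_line_range_py start_char end_char lines out) := by unfold Spec_charpos_to_line_range_py; infer_instance

-- ===== CLAIM (what is proved, stated in full; the proofs are below) =====
def Claim_equal_charpos_to_line_range_py : Prop := ∀ (start_char : Option Int) (end_char : Option Int) (lines : List String), Dom_charpos_to_line_range_py start_char end_char lines → Spec_charpos_to_line_range_py start_char end_char lines (charpos_to_line_range_py start_char end_char lines)

-- ===== LEMMAS AND PROOFS =====

-- reference locator: 1-based index of the line whose [off, off+len) interval contains t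
def pvLoc (t : Int) : List String → Int → Nat → Option Nat
  | [], _, _ => none
  | ln :: rest, off, idx =>
    if off ≤ t ∧ t < off + PySem.Str.len ln then some idx
    else pvLoc t rest (off + PySem.Str.len ln) (idx + 1)

def pvVal (t : Int) (ls : List String) (off : Int) (idx : Nat) (d : Int) : Int :=
  match pvLoc t ls off idx with
  | some i => (i : Int) + 1
  | none => d

-- cumulative-offset list in structured form
def pvCum (off : Int) : List String → List Int
  | [] => [off]
  | ln :: rest => off :: pvCum (off + PySem.Str.len ln) rest

lemma pv_len_nonneg (s : String) : 0 ≤ PySem.Str.len s := by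
  simp [PySem.Str.len_eq]

lemma pvCum_eq_cons (off : Int) (ls : List String) : ∃ tl, pvCum off ls = off :: tl := by
  cases ls <;> simp [pvCum]

lemma pvVal_cons (t : Int) (ln : String) (rest : List String) (off : Int) (idx : Nat) (d : Int) :
    pvVal t (ln :: rest) off idx d =
      if off ≤ t ∧ t < off + PySem.Str.len ln then (idx : Int) + 1
      else pvVal t rest (off + PySem.Str.len ln) (idx + 1) d := by
  simp only [pvVal, pvLoc]
  split_ifs <;> rfl

lemma pvBuildCum_eq (ls : List String) : ∀ (pre : List Int) (L : Int),
    pvBuildCum ls (pre ++ [L]) = pre ++ pvCum L ls := by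
  induction ls with
  | nil => intro pre L; simp [pvBuildCum, pvCum]
  | cons ln rest ih =>
    intro pre L
    calc pvBuildCum (ln :: rest) (pre ++ [L])
        = pvBuildCum rest ((pre ++ [L]) ++ [L + PySem.Str.len ln]) := by
          simp [pvBuildCum]
      _ = (pre ++ [L]) ++ pvCum (L + PySem.Str.len ln) rest := ih (pre ++ [L]) _
      _ = pre ++ pvCum L (ln :: rest) := by simp [pvCum]

lemma pvCum_length (off : Int) (ls : List String) : (pvCum off ls).length = ls.length + 1 := by
  induction ls generalizing off with
  | nil => simp [pvCum]
  | cons ln rest ih => simp [pvCum, ih]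

lemma pvCum_getD_zero (off : Int) (ls : List String) : (pvCum off ls).getD 0 0 = off := by
  cases ls <;> simp [pvCum]

lemma pvCum_mono (ls : List String) : ∀ (off : Int) (a b : Nat), a ≤ b → b ≤ ls.length →
    (pvCum off ls).getD a 0 ≤ (pvCum off ls).getD b 0 := by
  induction ls with
  | nil =>
    intro off a b hab hb
    have hb0 : b = 0 := by simpa using hb
    have ha0 : a = 0 := by omega
    rw [ha0, hb0]
  | cons ln rest ih =>
    intro off a b hab hb
    cases a with
    | zero =>
      cases b with
      | zero => simp
      | succ k =>
        have h1 := ih (off + PySem.Str.len ln) 0 k (Nat.zero_le k) (by simpa using hb)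
        rw [pvCum_getD_zero] at h1
        have h2 := pv_len_nonneg ln
        simp only [pvCum, List.getD_cons_zero, List.getD_cons_succ]
        omega
    | succ j =>
      cases b with
      | zero => omega
      | succ k =>
        simp only [pvCum, List.getD_cons_succ]
        exact ih (off + PySem.Str.len ln) j k (by omega) (by simpa using hb)

lemma pvLoc_shift (t : Int) (ls : List String) : ∀ (off : Int) (idx : Nat),
    pvLoc t ls off idx = (pvLoc t ls off 0).map (· + idx) := by
  induction ls with
  | nil => intro off idx; simp [pvLoc]
  | cons ln rest ih =>
    intro off idx
    simp only [pvLoc]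
    split_ifs with h
    · simp
    · rw [ih _ (idx + 1), ih _ (0 + 1)]
      cases pvLoc t rest (off + PySem.Str.len ln) 0 with
      | none => rfl
      | some a => simp; omega

lemma pvLoc_some_lt (t : Int) (ls : List String) : ∀ (off : Int) (i : Nat),
    pvLoc t ls off 0 = some i → i < ls.length := by
  induction ls with
  | nil => intro off i h; simp [pvLoc] at h
  | cons ln rest ih =>
    intro off i h
    simp only [pvLoc] at h
    split_ifs at h with hc
    · simp at h
      simp only [List.length_cons]
      omega
    · rw [pvLoc_shift] at h
      cases hr : pvLoc t rest (off + PySem.Str.len ln) 0 with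
      | none => rw [hr] at h; simp at h
      | some i' =>
        rw [hr] at h
        simp at h
        have := ih _ _ hr
        simp
        omega

lemma pvLoc_some_P (t : Int) (ls : List String) : ∀ (off : Int) (i : Nat),
    pvLoc t ls off 0 = some i →
    (pvCum off ls).getD i 0 ≤ t ∧ t < (pvCum off ls).getD (i + 1) 0 := by
  induction ls with
  | nil => intro off i h; simp [pvLoc] at h
  | cons ln rest ih =>
    intro off i h
    simp only [pvLoc] at h
    split_ifs at h with hc
    · simp at h
      subst h
      simp only [pvCum, List.getD_cons_zero, List.getD_cons_succ, pvCum_getD_zero]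
      exact hc
    · rw [pvLoc_shift] at h
      cases hr : pvLoc t rest (off + PySem.Str.len ln) 0 with
      | none => rw [hr] at h; simp at h
      | some i' =>
        rw [hr] at h
        simp at h
        have hP := ih _ _ hr
        rw [← h]
        simpa only [pvCum, List.getD_cons_succ] using hP

lemma pvLoc_none_noP (t : Int) (ls : List String) : ∀ (off : Int),
    pvLoc t ls off 0 = none → ∀ k, k < ls.length →
    ¬ ((pvCum off ls).getD k 0 ≤ t ∧ t < (pvCum off ls).getD (k + 1) 0) := by
  induction ls with
  | nil => intro off h k hk; simp at hk
  | cons ln rest ih =>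
    intro off h k hk
    simp only [pvLoc] at h
    split_ifs at h with hc
    rw [pvLoc_shift] at h
    cases hr : pvLoc t rest (off + PySem.Str.len ln) 0 with
    | some i' => rw [hr] at h; simp at h
    | none =>
      cases k with
      | zero =>
        simp only [pvCum, List.getD_cons_zero, List.getD_cons_succ, pvCum_getD_zero]
        exact hc
      | succ j =>
        simp only [pvCum, List.getD_cons_succ]
        exact ih _ hr j (by simpa using hk)

lemma pvScanFwd_eq (t : Int) (ls : List String) : ∀ (off : Int) (idx : Nat),
    pvScanFwd t (pvCum off ls) idx = pvVal t ls off idx 1 := by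
  induction ls with
  | nil => intro off idx; simp [pvCum, pvScanFwd, pvVal, pvLoc]
  | cons ln rest ih =>
    intro off idx
    obtain ⟨tl, htl⟩ := pvCum_eq_cons (off + PySem.Str.len ln) rest
    rw [pvVal_cons]
    show pvScanFwd t (off :: pvCum (off + PySem.Str.len ln) rest) idx = _
    rw [htl]
    show (if off ≤ t ∧ t < off + PySem.Str.len ln then (idx : Int) + 1
          else pvScanFwd t ((off + PySem.Str.len ln) :: tl) (idx + 1)) = _
    rw [← htl, ih]

lemma pvScanBwd_none (m : Int) (cum : List Int) : ∀ (n : Nat),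
    (∀ k, k < n → ¬ (cum.getD k 0 ≤ m ∧ m < cum.getD (k + 1) 0)) →
    pvScanBwd m cum n = 1 := by
  intro n
  induction n with
  | zero => intro _; rfl
  | succ j ih =>
    intro h
    simp only [pvScanBwd]
    rw [if_neg (h j (by omega))]
    exact ih fun k hk => h k (by omega)

lemma pvScanBwd_some (m : Int) (cum : List Int) (i : Nat)
    (hP : cum.getD i 0 ≤ m ∧ m < cum.getD (i + 1) 0) :
    ∀ (n : Nat), i < n → (∀ k, i < k → k < n → ¬ (cum.getD k 0 ≤ m ∧ m < cum.getD (k + 1) 0)) →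
    pvScanBwd m cum n = (i : Int) + 1 := by
  intro n
  induction n with
  | zero => omega
  | succ j ih =>
    intro hin hno
    by_cases hij : i = j
    · subst hij
      simp only [pvScanBwd]
      rw [if_pos hP]
    · have hij' : i < j := by omega
      simp only [pvScanBwd]
      rw [if_neg (hno j hij' (by omega))]
      exact ih hij' fun k hk1 hk2 => hno k hk1 (by omega)

lemma pvScanBwd_eq (m : Int) (ls : List String) :
    pvScanBwd m (pvCum 0 ls) ((pvCum 0 ls).length - 1) = pvVal m ls 0 0 1 := by
  have hlen : (pvCum 0 ls).length - 1 = ls.length := by simp [pvCum_length]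
  rw [hlen]
  cases h : pvLoc m ls 0 0 with
  | some i =>
    have hP := pvLoc_some_P m ls 0 i h
    have hlt := pvLoc_some_lt m ls 0 i h
    have hval : pvVal m ls 0 0 1 = (i : Int) + 1 := by simp [pvVal, h]
    rw [hval]
    apply pvScanBwd_some m _ i hP ls.length hlt
    intro k hk1 hk2 hPk
    have hmono : (pvCum 0 ls).getD (i + 1) 0 ≤ (pvCum 0 ls).getD k 0 :=
      pvCum_mono ls 0 (i + 1) k (by omega) (by omega)
    omega
  | none =>
    have hval : pvVal m ls 0 0 1 = 1 := by simp [pvVal, h]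
    rw [hval]
    exact pvScanBwd_none m _ ls.length (fun k hk => pvLoc_none_noP m ls 0 h k hk)

lemma pvBLoop_eq (s m : Int) (ls : List String) : ∀ (idx : Nat) (off sl : Int) (sset : Bool) (el : Int) (eset : Bool),
    pvBLoop s m ls idx off sl sset el eset =
      ((if sset then sl else pvVal s ls off idx sl), (if eset then el else pvVal m ls off idx el)) := by
  induction ls with
  | nil => intro idx off sl sset el eset; cases sset <;> cases eset <;> simp [pvBLoop, pvVal, pvLoc]
  | cons ln rest ih =>
    intro idx off sl sset el eset
    simp only [pvBLoop]
    rw [ih]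
    rw [pvVal_cons, pvVal_cons]
    cases sset <;> cases eset <;>
      by_cases hs : off ≤ s ∧ s < off + PySem.Str.len ln <;>
      by_cases he : off ≤ m ∧ m < off + PySem.Str.len ln <;>
      simp only [hs, he, decide_false, Bool.not_true, Bool.not_false,
        Bool.true_and, Bool.false_and, Bool.or_false,
        if_true, if_false, Prod.mk.injEq] <;>
      constructor <;> rfl

-- ===== VERDICT (by name: the statement is the Claim_ definition above) =====
theorem charpos_to_line_range_py_spec : Claim_equal_charpos_to_line_range_py := by
  intro start_char end_char lines _
  unfold Spec_charpos_to_line_range_py charpos_to_line_range_py charpos_to_line_range_py_alt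
  by_cases hg : (start_char.isNone || end_char.isNone || lines.isEmpty) = true
  · rw [if_pos hg, if_pos hg]
  · rw [if_neg hg, if_neg hg]
    have hcum : pvBuildCum lines [0] = pvCum 0 lines := by
      simpa using pvBuildCum_eq lines [] 0
    simp only [hcum]
    rw [pvScanFwd_eq, pvScanBwd_eq, pvBLoop_eq]
    simp
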